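-- pv_equiv track=rewrite | github.com/samarpro/villani-code | villani_code/context_projection.py | _is_runtime_artifact_path
-- ===== SOURCE A (Python) =====
-- def _is_runtime_artifact_path(path: str) -> bool:
--     normalized = str(path).strip().replace("\\", "/")
--     while normalized.startswith("./"):
--         normalized = normalized[2:]
--     if not normalized:
--         return False
--     parts = [part for part in normalized.split("/") if part]
--     return ".villani_code" in parts
-- ===== SOURCE B (Python) =====
-- def _is_runtime_artifact_path(path: str) -> bool:
--     normalized = str(path).strip().replace("\\", "/")
--     return "/.villani_code/" in "/" + normalized + "/"
-- ===== Notes on version B (the rewrite author's own statement) =====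
-- stated objective: simpler
-- what changed: B builds no component list at all: instead of A's './'-stripping loop, split on '/' and list membership, it wraps the normalized string in slashes and does one substring containment test for '/.villani_code/'.
import Mathlib
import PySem

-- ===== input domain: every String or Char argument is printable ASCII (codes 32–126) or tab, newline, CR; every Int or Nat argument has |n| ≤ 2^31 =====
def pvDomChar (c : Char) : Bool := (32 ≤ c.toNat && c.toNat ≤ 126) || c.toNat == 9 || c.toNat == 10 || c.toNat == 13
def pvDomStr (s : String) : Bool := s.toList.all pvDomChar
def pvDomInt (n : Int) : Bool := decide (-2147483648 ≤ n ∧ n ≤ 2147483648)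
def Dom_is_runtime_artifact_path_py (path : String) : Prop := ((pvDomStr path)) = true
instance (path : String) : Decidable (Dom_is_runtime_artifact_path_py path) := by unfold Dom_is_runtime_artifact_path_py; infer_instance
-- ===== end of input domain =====

-- B builds no component list: instead of A's './'-stripping loop, split on '/' and membership
-- test, it wraps the normalized string in slashes and does one substring test for
-- "/.villani_code/" (simpler).

-- ===== PORT A =====
-- the 'while normalized.startswith("./"): normalized = normalized[2:]' loop
def pvStripA (cs : List Char) : List Char :=
  if PySem.Chars.startswith cs ['.', '/'] then
    pvStripA (PySem.List.slice cs (some 2) none)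
  else cs
termination_by cs.length
decreasing_by
  rename_i h
  have hp : ['.', '/'] <+: cs := (PySem.Chars.startswith_iff cs ['.', '/']).mp h
  rcases hp with ⟨t, ht⟩
  subst ht
  have hslice : PySem.List.slice ('.' :: '/' :: t) (some 2) none = t := by simp [pysem]
  simp [hslice]

def is_runtime_artifact_path_py (path : String) : Bool :=
  let normalized := PySem.Chars.replace (PySem.Chars.strip path.toList) ['\\'] ['/']
  let normalized := pvStripA normalized
  if normalized = [] then false
  else
    let parts := (PySem.Chars.splitOn normalized ['/']).filter (fun part => part ≠ [])
    parts.contains ".villani_code".toList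

-- ===== PORT B =====
def is_runtime_artifact_path_py_alt (path : String) : Bool :=
  let normalized := PySem.Chars.replace (PySem.Chars.strip path.toList) ['\\'] ['/']
  PySem.Chars.isIn "/.villani_code/".toList ('/' :: (normalized ++ ['/']))

-- ===== PRECONDITION & SPEC =====
def Spec_is_runtime_artifact_path_py (path : String) (out : Bool) : Prop := out = is_runtime_artifact_path_py_alt path
instance (path : String) (out : Bool) : Decidable (Spec_is_runtime_artifact_path_py path out) := by unfold Spec_is_runtime_artifact_path_py; infer_instance

-- ===== CLAIM (what is proved, stated in full; the proofs are below) =====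
def Claim_equal_is_runtime_artifact_path_py : Prop := ∀ (path : String), Dom_is_runtime_artifact_path_py path → Spec_is_runtime_artifact_path_py path (is_runtime_artifact_path_py path)

-- ===== LEMMAS AND PROOFS =====

-- structural characterisation of PySem.Chars.splitOn · ['/']
def mySplit : List Char → List (List Char)
  | [] => [[]]
  | c :: rest =>
    if c = '/' then [] :: mySplit rest
    else
      match mySplit rest with
      | r :: rs => (c :: r) :: rs
      | [] => [[c]]

lemma mySplit_ne_nil (l : List Char) : mySplit l ≠ [] := by
  cases l with
  | nil => simp [mySplit]
  | cons c rest =>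
    simp only [mySplit]
    split_ifs
    · simp
    · rcases h : mySplit rest with _ | ⟨r, rs⟩ <;> simp

lemma go_eq (l : List Char) : ∀ (fuel : Nat) (cur : List Char) (acc : List (List Char)),
    l.length ≤ fuel →
    PySem.Chars.splitOn.go ['/'] fuel l cur acc =
      acc.reverse ++ (match mySplit l with
        | r :: rs => (cur.reverse ++ r) :: rs
        | [] => [cur.reverse]) := by
  induction l with
  | nil =>
    intro fuel cur acc _
    cases fuel <;> simp [PySem.Chars.splitOn.go, mySplit]
  | cons c rest ih =>
    intro fuel cur acc hf
    cases fuel with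
    | zero => simp at hf
    | succ f =>
      simp only [List.length_cons] at hf
      by_cases hc : c = '/'
      · subst hc
        rw [PySem.Chars.splitOn.go]
        simp only [List.isPrefixOf, List.length_cons]
        rw [if_pos (by simp)]
        simp only [List.length_nil, List.drop_succ_cons, List.drop_zero]
        rw [ih f [] (cur.reverse :: acc) (by omega)]
        rcases h : mySplit rest with _ | ⟨r, rs⟩
        · exact absurd h (mySplit_ne_nil rest)
        · simp [mySplit, h]
      · rw [PySem.Chars.splitOn.go]
        rw [if_neg (by simp [List.isPrefixOf]; intro h; exact hc h.symm)]
        rw [ih f (c :: cur) acc (by omega)]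
        rcases h : mySplit rest with _ | ⟨r, rs⟩
        · exact absurd h (mySplit_ne_nil rest)
        · simp [mySplit, h, hc]

lemma splitOn_eq_mySplit (l : List Char) : PySem.Chars.splitOn l ['/'] = mySplit l := by
  rw [PySem.Chars.splitOn, go_eq l (l.length + 1) [] [] (by omega)]
  rcases h : mySplit l with _ | ⟨r, rs⟩
  · exact absurd h (mySplit_ne_nil l)
  · simp

-- the target component, nonempty, slash-free and distinct from "."
def pvTarget : List Char := ".villani_code".toList

lemma mySplit_dotslash (cs : List Char) : mySplit ('.' :: '/' :: cs) = ['.'] :: mySplit cs := by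
  simp [mySplit]

lemma mem_mySplit_dotslash (cs : List Char) :
    (pvTarget ∈ mySplit ('.' :: '/' :: cs)) ↔ pvTarget ∈ mySplit cs := by
  rw [mySplit_dotslash, List.mem_cons]
  have : pvTarget ≠ ['.'] := by decide
  tauto

-- the stripping loop does not change whether the target is among the '/'-components
lemma mem_mySplit_pvStripA (cs : List Char) :
    (pvTarget ∈ mySplit (pvStripA cs)) ↔ pvTarget ∈ mySplit cs := by
  induction cs using pvStripA.induct with
  | case1 cs h ih =>
    have hp : ['.', '/'] <+: cs := (PySem.Chars.startswith_iff cs ['.', '/']).mp h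
    rcases hp with ⟨t, ht⟩
    subst ht
    have hslice : PySem.List.slice ('.' :: '/' :: t) (some 2) none = t := by simp [pysem]
    simp only [List.cons_append, List.nil_append] at ih ⊢
    rw [hslice] at ih
    rw [pvStripA, if_pos (show PySem.Chars.startswith ('.' :: '/' :: t) ['.', '/'] = true by simpa using h), hslice, ih, mem_mySplit_dotslash]
  | case2 cs h =>
    rw [pvStripA, if_neg h]

lemma pvStripA_nil_no_target (cs : List Char) (h : pvStripA cs = []) :
    pvTarget ∉ mySplit cs := by
  intro hm
  have := (mem_mySplit_pvStripA cs).mpr hm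
  rw [h] at this
  simp only [mySplit, List.mem_singleton] at this
  exact absurd this (by decide)

lemma mem_filter_target (l : List (List Char)) :
    (pvTarget ∈ l.filter (fun part => part ≠ [])) ↔ pvTarget ∈ l := by
  rw [List.mem_filter]
  constructor
  · exact fun h => h.1
  · intro h; exact ⟨h, by decide⟩

-- first component of s equals t ↔ t++"/" is a prefix of s++"/"  (t slash-free)
lemma head_mySplit_iff :
    ∀ (s t : List Char), '/' ∉ t →
      ((∃ rs, mySplit s = t :: rs) ↔ (t ++ ['/']) <+: (s ++ ['/'])) := by
  intro s
  induction s with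
  | nil =>
    intro t _
    cases t with
    | nil => simp [mySplit]
    | cons d t' =>
      simp only [mySplit, List.nil_append, List.cons_append]
      constructor
      · rintro ⟨rs, hrs⟩
        simp at hrs
      · intro hp
        have := hp.length_le
        simp at this
  | cons c s' ih =>
    intro t hns
    by_cases hc : c = '/'
    · subst hc
      simp only [mySplit, reduceIte, List.cons_append]
      cases t with
      | nil =>
        simp only [List.nil_append]
        exact ⟨fun _ => ⟨s' ++ ['/'], rfl⟩, fun _ => ⟨mySplit s', rfl⟩⟩
      | cons d t' =>
        have hd : d ≠ '/' := fun h => hns (h ▸ List.mem_cons_self)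
        constructor
        · rintro ⟨rs, hrs⟩; simp at hrs
        · intro hp
          rcases List.cons_prefix_cons.mp hp with ⟨hdc, -⟩
          exact absurd hdc hd
    · simp only [mySplit, if_neg hc, List.cons_append]
      rcases h : mySplit s' with _ | ⟨r, rs⟩
      · exact absurd h (mySplit_ne_nil s')
      · cases t with
        | nil =>
          simp only [List.nil_append]
          constructor
          · rintro ⟨rs', hrs⟩; simp at hrs
          · intro hp
            rcases List.cons_prefix_cons.mp hp with ⟨hdc, -⟩
            exact absurd hdc.symm hc
        | cons d t' =>
          have hns' : '/' ∉ t' := fun hm => hns (List.mem_cons_of_mem _ hm)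
          constructor
          · rintro ⟨rs', hrs⟩
            simp only [List.cons.injEq] at hrs
            obtain ⟨⟨hdc, htr⟩, -⟩ := hrs
            subst hdc
            have : (t' ++ ['/']) <+: (s' ++ ['/']) :=
              (ih t' hns').mp ⟨rs, by rw [h, htr]⟩
            exact List.cons_prefix_cons.mpr ⟨rfl, this⟩
          · intro hp
            rcases List.cons_prefix_cons.mp hp with ⟨hdc, hp'⟩
            subst hdc
            obtain ⟨rs', hrs⟩ := (ih t' hns').mpr hp'
            rw [h] at hrs
            simp only [List.cons.injEq] at hrs
            exact ⟨rs, by rw [hrs.1]⟩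

-- "/t/" occurs inside s++"/" ↔ t is one of the NON-FIRST components of s  (t slash-free)
lemma infix_tail_iff (t : List Char) (hns : '/' ∉ t) :
    ∀ s : List Char, (('/' :: (t ++ ['/'])) <:+: (s ++ ['/'])) ↔ t ∈ (mySplit s).tail := by
  intro s
  induction s with
  | nil =>
    simp only [mySplit, List.nil_append, List.tail_cons, List.not_mem_nil, iff_false]
    intro hi
    have := hi.length_le
    simp at this
  | cons c s' ih =>
    by_cases hc : c = '/'
    · subst hc
      simp only [mySplit, reduceIte, List.cons_append, List.tail_cons]
      rw [List.infix_cons_iff]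
      have h1 : (('/' :: (t ++ ['/'])) <+: ('/' :: (s' ++ ['/']))) ↔
          ∃ rs, mySplit s' = t :: rs := by
        rw [List.cons_prefix_cons]
        simp only [true_and]
        exact (head_mySplit_iff s' t hns).symm
      rw [h1, ih]
      rcases h : mySplit s' with _ | ⟨r, rs⟩
      · exact absurd h (mySplit_ne_nil s')
      · simp only [List.tail_cons, List.mem_cons]
        constructor
        · rintro (⟨rs', hrs⟩ | hm)
          · simp only [List.cons.injEq] at hrs; exact Or.inl hrs.1.symm
          · exact Or.inr hm
        · rintro (ht | hm)
          · exact Or.inl ⟨rs, by rw [ht]⟩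
          · exact Or.inr hm
    · simp only [mySplit, if_neg hc, List.cons_append]
      rw [List.infix_cons_iff]
      have h1 : ¬ (('/' :: (t ++ ['/'])) <+: (c :: (s' ++ ['/']))) := by
        intro hp
        rcases List.cons_prefix_cons.mp hp with ⟨hdc, -⟩
        exact hc hdc.symm
      rw [ih]
      rcases h : mySplit s' with _ | ⟨r, rs⟩
      · exact absurd h (mySplit_ne_nil s')
      · simp [h1]

-- membership among the components ↔ substring of the slash-wrapped string  (t slash-free)
lemma mem_mySplit_iff_infix (t : List Char) (hns : '/' ∉ t) (s : List Char) :
    (t ∈ mySplit s) ↔ (('/' :: (t ++ ['/'])) <:+: ('/' :: (s ++ ['/']))) := by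
  rw [List.infix_cons_iff]
  have h1 : (('/' :: (t ++ ['/'])) <+: ('/' :: (s ++ ['/']))) ↔
      ∃ rs, mySplit s = t :: rs := by
    rw [List.cons_prefix_cons]
    simp only [true_and]
    exact (head_mySplit_iff s t hns).symm
  rw [h1, infix_tail_iff t hns s]
  rcases h : mySplit s with _ | ⟨r, rs⟩
  · exact absurd h (mySplit_ne_nil s)
  · simp only [List.tail_cons, List.mem_cons]
    constructor
    · rintro (ht | hm)
      · exact Or.inl ⟨rs, by rw [ht]⟩
      · exact Or.inr hm
    · rintro (⟨rs', hrs⟩ | hm)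
      · simp only [List.cons.injEq] at hrs; exact Or.inl hrs.1.symm
      · exact Or.inr hm

-- ===== VERDICT (by name: the statement is the Claim_ definition above) =====
theorem is_runtime_artifact_path_py_spec : Claim_equal_is_runtime_artifact_path_py := by
  intro path _
  unfold Spec_is_runtime_artifact_path_py
  unfold is_runtime_artifact_path_py is_runtime_artifact_path_py_alt
  set cs := PySem.Chars.replace (PySem.Chars.strip path.toList) ['\\'] ['/'] with hcs
  have hW : ("/.villani_code/".toList : List Char) = '/' :: (pvTarget ++ ['/']) := by decide
  have hns : '/' ∉ pvTarget := by decide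
  have hB : PySem.Chars.isIn "/.villani_code/".toList ('/' :: (cs ++ ['/'])) =
      decide (pvTarget ∈ mySplit cs) := by
    rw [hW]
    by_cases hmem : pvTarget ∈ mySplit cs
    · rw [(PySem.Chars.isIn_iff_infix _ _).mpr ((mem_mySplit_iff_infix pvTarget hns cs).mp hmem)]
      simp [hmem]
    · rw [(PySem.Chars.isIn_eq_false_iff _ _).mpr
        (fun hi => hmem ((mem_mySplit_iff_infix pvTarget hns cs).mpr hi))]
      simp [hmem]
  simp only [splitOn_eq_mySplit]
  rw [hB]
  by_cases hnil : pvStripA cs = []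
  · rw [if_pos hnil]
    have hnm := pvStripA_nil_no_target cs hnil
    simp [hnm]
  · rw [if_neg hnil]
    simp only [List.contains_eq_mem]
    rw [show ".villani_code".toList = pvTarget from rfl]
    rw [decide_eq_decide]
    rw [mem_filter_target]
    exact mem_mySplit_pvStripA cs
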